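-- pv_equiv track=rewrite | github.com/zzhhxx/webnovel-writer | webnovel-writer/scripts/data_modules/cli_args.py | _extract_flag_value
-- ===== SOURCE A (Python) =====
-- from typing import List, Optional, Tuple
--
-- def _extract_flag_value(argv: List[str], flag: str) -> Tuple[Optional[str], List[str]]:
--     """
--     Extract a flag value from argv.
--
--     Supports:
--     - --flag VALUE
--     - --flag=VALUE
--
--     Returns:
--     - (value, remaining_argv)
--     - value uses the *last* occurrence when repeated.
--     - if a dangling `--flag` has no value, it is kept in remaining_argv for argparse to raise.
--     """
--     value: Optional[str] = None
--     rest: List[str] = []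
--     i = 0
--     while i < len(argv):
--         token = argv[i]
--         if token == flag:
--             if i + 1 < len(argv):
--                 value = argv[i + 1]
--                 i += 2
--                 continue
--             # Dangling flag; keep it so argparse can error out properly.
--             rest.append(token)
--             i += 1
--             continue
--         if token.startswith(flag + "="):
--             value = token.split("=", 1)[1]
--             i += 1
--             continue
--         rest.append(token)
--         i += 1
--     return value, rest
-- ===== SOURCE B (Python) =====
-- from typing import List, Optional, Tuple
--
-- def _extract_flag_value(argv: List[str], flag: str) -> Tuple[Optional[str], List[str]]:
--     # Segment argv at the occurrences of `flag` (located with list.index), jump over each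
--     # "--flag VALUE" pair, collect every candidate value in order, and pick the last one
--     # at the end.  A dangling trailing `--flag` is kept in rest for argparse to error.
--     vals: List[str] = []
--     rest: List[str] = []
--     start = 0
--     n = len(argv)
--     while True:
--         try:
--             i = argv.index(flag, start)
--         except ValueError:
--             i = n
--         for t in argv[start:i]:
--             if t.startswith(flag + "="):
--                 vals.append(t.split("=", 1)[1])
--             else:
--                 rest.append(t)
--         if i == n:
--             break
--         if i + 1 < n:
--             vals.append(argv[i + 1])
--             start = i + 2
--         else:
--             rest.append(flag)
--             break
--     return (vals[-1] if vals else None), rest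
-- ===== Notes on version B (the rewrite author's own statement) =====
-- stated objective: alternative
-- what changed: Replaces A's per-token while loop with index lookahead by a segment-splitting algorithm: it locates each occurrence of flag with list.index, jumps over the '--flag VALUE' pairs, processes the flag-free segments in between, collects every candidate value in order and picks the last at the end.
import Mathlib
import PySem

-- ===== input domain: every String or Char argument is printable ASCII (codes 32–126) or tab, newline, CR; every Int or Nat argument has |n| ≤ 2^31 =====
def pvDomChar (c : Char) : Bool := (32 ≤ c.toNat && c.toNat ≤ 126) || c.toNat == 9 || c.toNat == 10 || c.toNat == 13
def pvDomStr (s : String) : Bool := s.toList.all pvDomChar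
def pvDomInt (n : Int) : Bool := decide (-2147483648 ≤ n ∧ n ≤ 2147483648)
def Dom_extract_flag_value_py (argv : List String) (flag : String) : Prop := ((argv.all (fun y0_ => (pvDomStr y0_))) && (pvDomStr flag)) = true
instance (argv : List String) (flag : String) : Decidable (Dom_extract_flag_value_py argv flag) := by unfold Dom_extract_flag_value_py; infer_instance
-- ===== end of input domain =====

-- B replaces A's per-token while loop with lookahead by a segment-splitting algorithm:
-- it locates each occurrence of `flag` with list.index, jumps over the `--flag VALUE`
-- pairs, collects all candidate values and picks the last at the end (objective: alternative).

-- token.split("=", 1)[1] (used, identically, in one branch of each Python)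
def pvEqTail (token : String) : String :=
  ((PySem.Str.splitMax? token "=" 1).getD []).getD 1 ""

-- ===== PORT A =====
-- A's while loop over index i, with the i+1 lookahead and i += 2 on `--flag VALUE`.
def pvLoopA (flag : String) : List String → Option String → List String → Option String × List String
  | [], value, rest => (value, rest)
  | token :: ts, value, rest =>
    if token = flag then
      match ts with
      | next :: ts' => pvLoopA flag ts' (some next) rest          -- value = argv[i+1]; i += 2
      | [] => (value, rest ++ [token])                            -- dangling flag kept; loop ends
    else if PySem.Str.startswith token (flag ++ "=") then
      pvLoopA flag ts (some (pvEqTail token)) rest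
    else
      pvLoopA flag ts value (rest ++ [token])

def extract_flag_value_py (argv : List String) (flag : String) : Option String × List String :=
  pvLoopA flag argv none []

-- ===== PORT B =====
-- Source B's inner `for t in argv[start:i]` segment loop, appending to vals / rest.
def pvSeg (flag : String) (seg : List String) (vals rest : List String) : List String × List String :=
  seg.foldl (fun vr t =>
    if PySem.Str.startswith t (flag ++ "=") then (vr.1 ++ [pvEqTail t], vr.2)
    else (vr.1, vr.2 ++ [t])) (vals, rest)

-- Source B's while loop; `xs` is argv[start:], `argv.index(flag, start)` is index? on it.
def pvSegB (flag : String) (xs : List String) (vals rest : List String) : Option String × List String :=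
  match h : PySem.List.index? xs flag with
  | none =>                                                       -- ValueError: i = n; last segment; break
    let vr := pvSeg flag xs vals rest
    (vr.1.getLast?, vr.2)                                         -- vals[-1] if vals else None
  | some i =>
    let vr := pvSeg flag (xs.take i) vals rest
    if _hlt : i + 1 < xs.length then
      pvSegB flag (xs.drop (i + 2)) (vr.1 ++ [xs.getD (i + 1) ""]) vr.2
    else
      (vr.1.getLast?, vr.2 ++ [flag])                             -- dangling flag; break
termination_by xs.length
decreasing_by
  obtain ⟨hk, -, -⟩ := PySem.List.getElem_of_index?_eq_some h
  simp only [List.length_drop]; omega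

def extract_flag_value_py_alt (argv : List String) (flag : String) : Option String × List String :=
  pvSegB flag argv [] []

-- ===== PRECONDITION & SPEC =====
def Spec_extract_flag_value_py (argv : List String) (flag : String) (out : Option String × List String) : Prop := out = extract_flag_value_py_alt argv flag
instance (argv : List String) (flag : String) (out : Option String × List String) : Decidable (Spec_extract_flag_value_py argv flag out) := by unfold Spec_extract_flag_value_py; infer_instance

-- ===== CLAIM (what is proved, stated in full; the proofs are below) =====
def Claim_equal_extract_flag_value_py : Prop := ∀ (argv : List String) (flag : String), Dom_extract_flag_value_py argv flag → Spec_extract_flag_value_py argv flag (extract_flag_value_py argv flag)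

-- ===== LEMMAS AND PROOFS =====

-- Intermediate characterisation: per token, the list of candidate values in order and the rest.
def pvVR (flag : String) : List String → List String × List String
  | [] => ([], [])
  | token :: ts =>
    if token = flag then
      match ts with
      | next :: ts' => (next :: (pvVR flag ts').1, (pvVR flag ts').2)
      | [] => ([], [flag])
    else if PySem.Str.startswith token (flag ++ "=") then
      (pvEqTail token :: (pvVR flag ts).1, (pvVR flag ts).2)
    else
      ((pvVR flag ts).1, token :: (pvVR flag ts).2)

theorem pvVR_cons (flag token : String) (ts : List String) :
    pvVR flag (token :: ts) =
      if token = flag then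
        match ts with
        | next :: ts' => (next :: (pvVR flag ts').1, (pvVR flag ts').2)
        | [] => ([], [flag])
      else if PySem.Str.startswith token (flag ++ "=") then
        (pvEqTail token :: (pvVR flag ts).1, (pvVR flag ts).2)
      else
        ((pvVR flag ts).1, token :: (pvVR flag ts).2) := by
  rw [pvVR.eq_def]

theorem pvGetLast?_cons {α : Type} (a : α) (l : List α) :
    (a :: l).getLast? = l.getLast?.or (some a) := by
  induction l generalizing a with
  | nil => rfl
  | cons b l ih => rw [List.getLast?_cons_cons, ih b]; cases l.getLast? <;> rfl

-- A's loop computes pvVR, merged with its accumulators (last value wins).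
theorem pvLoopA_eq (flag : String) : ∀ (ts : List String) (value : Option String) (rest : List String),
    pvLoopA flag ts value rest = ((pvVR flag ts).1.getLast?.or value, rest ++ (pvVR flag ts).2) := by
  intro ts v r
  induction ts, v, r using pvLoopA.induct (flag := flag) <;>
    rw [pvLoopA.eq_def] <;>
    simp_all [pvVR_cons, pvVR, PySem.Str.startswith, pvGetLast?_cons]

-- B's segment loop over a flag-free segment agrees with pvVR, appended to its accumulators.
theorem pvSeg_eq (flag : String) : ∀ (seg l vals rest : List String), flag ∉ seg →
    (pvSeg flag seg vals rest).1 ++ (pvVR flag l).1 = vals ++ (pvVR flag (seg ++ l)).1 ∧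
    (pvSeg flag seg vals rest).2 ++ (pvVR flag l).2 = rest ++ (pvVR flag (seg ++ l)).2 := by
  intro seg
  induction seg with
  | nil => simp [pvSeg]
  | cons t seg' ih =>
    intro l vals rest hmem
    have ht : ¬ t = flag := by rintro rfl; exact hmem List.mem_cons_self
    have hm' : flag ∉ seg' := fun h => hmem (List.mem_cons_of_mem _ h)
    by_cases hs : PySem.Chars.startswith t.toList (flag.toList ++ ['=']) = true
    · obtain ⟨h1, h2⟩ := ih l (vals ++ [pvEqTail t]) rest hm'
      have e1 : pvSeg flag (t :: seg') vals rest = pvSeg flag seg' (vals ++ [pvEqTail t]) rest := by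
        simp [pvSeg, PySem.Str.startswith, hs]
      have e2 : pvVR flag ((t :: seg') ++ l) =
          (pvEqTail t :: (pvVR flag (seg' ++ l)).1, (pvVR flag (seg' ++ l)).2) := by
        rw [List.cons_append, pvVR_cons]; simp [PySem.Str.startswith, ht, hs]
      rw [e1, e2]
      exact ⟨by rw [h1]; simp, h2⟩
    · obtain ⟨h1, h2⟩ := ih l vals (rest ++ [t]) hm'
      have e1 : pvSeg flag (t :: seg') vals rest = pvSeg flag seg' vals (rest ++ [t]) := by
        simp [pvSeg, PySem.Str.startswith, hs]
      have e2 : pvVR flag ((t :: seg') ++ l) =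
          ((pvVR flag (seg' ++ l)).1, t :: (pvVR flag (seg' ++ l)).2) := by
        rw [List.cons_append, pvVR_cons]; simp [PySem.Str.startswith, ht, hs]
      rw [e1, e2]
      exact ⟨h1, by rw [h2]; simp⟩

theorem pvSegB_eq (flag : String) : ∀ (xs vals rest : List String),
    pvSegB flag xs vals rest = ((vals ++ (pvVR flag xs).1).getLast?, rest ++ (pvVR flag xs).2) := by
  intro xs vals rest
  induction xs, vals, rest using pvSegB.induct (flag := flag) with
  | case1 xs vals rest h =>
    have hmem : flag ∉ xs := (PySem.List.index?_eq_none_iff _ _).1 h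
    obtain ⟨h1, h2⟩ := pvSeg_eq flag xs [] vals rest hmem
    simp only [pvVR, List.append_nil] at h1 h2
    rw [pvSegB]
    split
    · simp [h1, h2]
    · next j heq => rw [h] at heq; cases heq
  | case2 xs vals rest i h vr hlt ih =>
    obtain ⟨pre, suf, hxs, hlen, hpre⟩ := (PySem.List.index?_eq_some_iff _ _ _).1 h
    subst hxs; subst hlen
    have hsuf : suf ≠ [] := by intro hn; subst hn; simp at hlt
    obtain ⟨next, suf', rfl⟩ := List.exists_cons_of_ne_nil hsuf
    have htake : (pre ++ flag :: next :: suf').take pre.length = pre := by simp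
    have hdrop : (pre ++ flag :: next :: suf').drop (pre.length + 2) = suf' := by
      rw [← List.drop_drop (i := 2) (j := pre.length), List.drop_left]
      rfl
    have hget : (pre ++ flag :: next :: suf').getD (pre.length + 1) "" = next := by
      rw [List.getD_eq_getElem?_getD, List.getElem?_append_right (by omega)]
      simp
    have hvr : vr = pvSeg flag pre vals rest := by
      show pvSeg flag ((pre ++ flag :: next :: suf').take pre.length) vals rest = _
      rw [htake]
    rw [hvr, hdrop, hget] at ih
    obtain ⟨h1, h2⟩ := pvSeg_eq flag pre (flag :: next :: suf') vals rest hpre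
    have hv2 : pvVR flag (flag :: next :: suf') = (next :: (pvVR flag suf').1, (pvVR flag suf').2) := by
      rw [pvVR_cons]; simp
    rw [hv2] at h1 h2
    rw [pvSegB]
    split
    · next heq => rw [h] at heq; cases heq
    · next j heq =>
      rw [h] at heq; injection heq with hj; subst hj
      rw [dif_pos hlt, htake, hdrop, hget, ih]
      refine Prod.ext ?_ ?_
      · show ((pvSeg flag pre vals rest).1 ++ [next] ++ (pvVR flag suf').1).getLast? = _
        rw [List.append_assoc]
        simp only [List.singleton_append]
        rw [h1]
      · exact h2
  | case3 xs vals rest i h hlt =>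
    obtain ⟨pre, suf, hxs, hlen, hpre⟩ := (PySem.List.index?_eq_some_iff _ _ _).1 h
    subst hxs; subst hlen
    have hsuf : suf = [] := by
      cases suf with
      | nil => rfl
      | cons a l => simp at hlt
    subst hsuf
    have htake : (pre ++ [flag]).take pre.length = pre := by simp
    obtain ⟨h1, h2⟩ := pvSeg_eq flag pre [flag] vals rest hpre
    have hv2 : pvVR flag [flag] = ([], [flag]) := by rw [pvVR_cons]; simp
    rw [hv2] at h1 h2
    simp only [List.append_nil] at h1
    rw [pvSegB]
    split
    · next heq => rw [h] at heq; cases heq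
    · next j heq =>
      rw [h] at heq; injection heq with hj; subst hj
      rw [dif_neg hlt, htake]
      refine Prod.ext ?_ ?_
      · rw [h1]
      · exact h2

-- ===== VERDICT (by name: the statement is the Claim_ definition above) =====
theorem extract_flag_value_py_spec : Claim_equal_extract_flag_value_py := by
  intro argv flag _
  unfold Spec_extract_flag_value_py extract_flag_value_py extract_flag_value_py_alt
  rw [pvLoopA_eq, pvSegB_eq]
  simp
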